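-- pv_equiv track=rewrite | github.com/o-ozogie/lunch-date-bot | main.py | group_size_distribute
-- ===== SOURCE A (Python) =====
-- from functools import reduce
-- import math
--
-- def group_size_distribute(attendee_groups: list[list[str]], limit: int) -> list[list[str]]:
--     attendee_count = reduce(lambda count, attendee_group: count + len(attendee_group), attendee_groups, 0)
--     groups = [[] for _ in range(math.ceil(attendee_count / limit))]
--
--     x, y = 0, 0
--     member_count = 0
--     while attendee_count != member_count:
--         if len(attendee_groups[x % len(attendee_groups)]) <= y:
--             x += 1
--             continue
--         groups[int(member_count / limit)].append(attendee_groups[x % len(attendee_groups)][y])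
--         x += 1
--         member_count += 1
--         if x % len(attendee_groups) == 0:
--             y += 1
--
--     return groups
-- ===== SOURCE B (Python) =====
-- def group_size_distribute(attendee_groups: list[list[str]], limit: int) -> list[list[str]]:
--     max_len = max(map(len, attendee_groups), default=0)
--     flat = []
--     active = attendee_groups
--     for y in range(max_len):
--         active = [g for g in active if len(g) > y]
--         for g in active:
--             flat.append(g[y])
--     return [flat[i : i + limit] for i in range(0, len(flat), limit)]
-- ===== Notes on version B (the rewrite author's own statement) =====
-- stated objective: faster
-- what changed: B replaces A's one-element-at-a-time while loop (which rescans every group, exhausted or not, on every pass and places each element individually via groups[mc//limit].append) by a column-major flatten that prunes exhausted groups as it goes and a single slicing pass that chunks the flat list; Pre_ excludes only inputs where A raises (limit == 0, or limit < 0 with at least one attendee).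
-- intended difference: On inputs where some group is more than one element longer than the last group, A's wrap test (skipped by `continue` once the last group is exhausted) freezes the column index, so A fills the remaining slots with duplicated attendees and omits others; B places every attendee exactly once, which is the intended distribution. — e.g. on group_size_distribute([["a", "b", "c"], ["d"]], 2): A returns [["a", "d"], ["b", "b"]], B returns [["a", "d"], ["b", "c"]]
import Mathlib
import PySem

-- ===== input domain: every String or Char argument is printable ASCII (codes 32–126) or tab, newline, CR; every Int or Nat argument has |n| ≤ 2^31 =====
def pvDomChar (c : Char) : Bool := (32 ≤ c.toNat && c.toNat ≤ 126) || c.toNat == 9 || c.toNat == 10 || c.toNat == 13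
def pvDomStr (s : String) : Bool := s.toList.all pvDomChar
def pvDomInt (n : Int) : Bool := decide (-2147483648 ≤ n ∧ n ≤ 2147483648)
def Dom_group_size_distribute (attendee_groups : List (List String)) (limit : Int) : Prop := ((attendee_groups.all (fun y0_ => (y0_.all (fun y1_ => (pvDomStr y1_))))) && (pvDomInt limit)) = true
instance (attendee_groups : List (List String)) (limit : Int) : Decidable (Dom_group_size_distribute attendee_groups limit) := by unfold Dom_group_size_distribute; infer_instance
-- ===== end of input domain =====

-- B flattens the groups column-major, pruning exhausted groups, and chunks at the end;
-- on inputs where some group is more than one longer than the LAST group, A duplicates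
-- attendees (stated as D_ below) while B places each attendee once. Return value only.

-- ===== PORT A =====
-- groups[i].append(s): Python list mutation, ported as a functional update
def pvAppendAt (gs : List (List String)) (i : Nat) (s : String) : List (List String) :=
  gs.modify i (fun g => g ++ [s])

-- the while loop of A; x, y, member_count are nonnegative Python ints, ported as Nat.
-- fuel only makes the recursion total: the proof shows the seeded fuel is never exhausted
-- on inputs satisfying Pre_.  ags[x % len(ags)] is in range whenever the loop runs
-- (len(ags) > 0 then), so List.getD is exact; int(mc / limit) = mc // limit = mc / k for
-- 0 ≤ mc, 0 < limit (exact: both operands far below 2^53, so the float division is exact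
-- on the quotient's floor).
def pvLoopA (ags : List (List String)) (k t : Nat) :
    Nat → Nat → Nat → Nat → List (List String) → List (List String)
  | 0, _, _, _, groups => groups
  | fuel+1, x, y, mc, groups =>
    if mc = t then groups
    else if (ags.getD (x % ags.length) []).length ≤ y then
      pvLoopA ags k t fuel (x+1) y mc groups
    else
      pvLoopA ags k t fuel (x+1) (if (x+1) % ags.length = 0 then y+1 else y) (mc+1)
        (pvAppendAt groups (mc / k) ((ags.getD (x % ags.length) []).getD y ""))

def group_size_distribute (attendee_groups : List (List String)) (limit : Int) : List (List String) :=
  let attendee_count : Int := attendee_groups.foldl (fun c g => c + (g.length : Int)) 0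
  -- math.ceil(attendee_count / limit): exact as ceiling division -((-a) // limit)
  let nslots : Int := -(PySem.Int.floordiv (-attendee_count) limit)
  pvLoopA attendee_groups limit.toNat attendee_count.toNat
    ((attendee_count.toNat + 1) * (attendee_groups.length + 1) * 2) 0 0 0
    (List.replicate nslots.toNat [])

-- ===== PORT B =====
-- one iteration of B's column loop: prune exhausted groups, then append column y
def pvColStep (st : List (List String) × List String) (y : Nat) :
    List (List String) × List String :=
  let act := st.1.filter (fun g => y < g.length)
  (act, act.foldl (fun fl g => fl ++ [g.getD y ""]) st.2)

def group_size_distribute_alt (attendee_groups : List (List String)) (limit : Int) : List (List String) :=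
  -- max(map(len, attendee_groups), default=0): lengths are nonnegative, ported as Nat
  let maxLen : Nat := (attendee_groups.map List.length).foldl Nat.max 0
  let st := (List.range maxLen).foldl pvColStep (attendee_groups, [])
  let flat := st.2
  (PySem.List.pyRange 0 (flat.length : Int) limit).foldl
    (fun out i => out ++ [PySem.List.slice flat (some i) (some (i + limit))]) []

-- ===== PRECONDITION & SPEC =====
-- Pre_ excludes exactly the inputs on which A raises: limit = 0 (ZeroDivisionError in
-- math.ceil(count/limit)) and limit < 0 with at least one attendee (groups is then empty
-- and groups[0].append raises IndexError); A returns normally everywhere else.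
def Pre_group_size_distribute (attendee_groups : List (List String)) (limit : Int) : Prop :=
  0 < limit ∨ (limit < 0 ∧ ∀ g ∈ attendee_groups, g = [])
instance (attendee_groups : List (List String)) (limit : Int) : Decidable (Pre_group_size_distribute attendee_groups limit) := by unfold Pre_group_size_distribute; infer_instance

def pvWitness_group_size_distribute : List (List String) × Int := ([["a", "b"], ["c"]], 2)

-- On inputs where some group is more than one element longer than the last group, A's
-- stalled wrap test (skipped by `continue`) freezes the column index, so A fills the
-- remaining slots with duplicated attendees and omits others; B places every attendee
-- exactly once, which is the intended distribution.
def D_group_size_distribute (attendee_groups : List (List String)) (limit : Int) : Prop :=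
  ∃ g ∈ attendee_groups, (attendee_groups.getLast?.getD []).length + 1 < g.length
instance (attendee_groups : List (List String)) (limit : Int) : Decidable (D_group_size_distribute attendee_groups limit) := by unfold D_group_size_distribute; infer_instance

def Spec_group_size_distribute (attendee_groups : List (List String)) (limit : Int) (out : List (List String)) : Prop := ¬ D_group_size_distribute attendee_groups limit → out = group_size_distribute_alt attendee_groups limit
instance (attendee_groups : List (List String)) (limit : Int) (out : List (List String)) : Decidable (Spec_group_size_distribute attendee_groups limit out) := by unfold Spec_group_size_distribute; infer_instance

def pvDiffWitness_group_size_distribute : List (List String) × Int := ([["a", "b", "c"], ["d"]], 2)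
def pvDiffWitnessOut_group_size_distribute : (List (List String)) × (List (List String)) :=
  ([["a", "d"], ["b", "b"]], [["a", "d"], ["b", "c"]])

-- ===== CLAIM (what is proved, stated in full; the proofs are below) =====
def Claim_unchanged_group_size_distribute : Prop := ∀ (attendee_groups : List (List String)) (limit : Int), Dom_group_size_distribute attendee_groups limit → Pre_group_size_distribute attendee_groups limit → Spec_group_size_distribute attendee_groups limit (group_size_distribute attendee_groups limit)
def Claim_changed_group_size_distribute : Prop := Dom_group_size_distribute (pvDiffWitness_group_size_distribute.1) (pvDiffWitness_group_size_distribute.2) ∧ Pre_group_size_distribute (pvDiffWitness_group_size_distribute.1) (pvDiffWitness_group_size_distribute.2) ∧ D_group_size_distribute (pvDiffWitness_group_size_distribute.1) (pvDiffWitness_group_size_distribute.2) ∧ group_size_distribute (pvDiffWitness_group_size_distribute.1) (pvDiffWitness_group_size_distribute.2) = pvDiffWitnessOut_group_size_distribute.1 ∧ group_size_distribute_alt (pvDiffWitness_group_size_distribute.1) (pvDiffWitness_group_size_distribute.2) = pvDiffWitnessOut_group_size_distribute.2 ∧ pvDiffWitnessOut_group_size_distribute.1 ≠ pvDiffWitn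essOut_group_size_distribute.2

-- ===== LEMMAS AND PROOFS =====

-- total number of attendees
def pvTotal (ags : List (List String)) : Nat := (ags.map List.length).sum
-- column y of the round robin: element y of every group that still has one
def pvColAt (ags : List (List String)) (y : Nat) : List String :=
  (ags.filter (fun g => y < g.length)).map (fun g => g.getD y "")
-- columns y, y+1, …, y+d-1 concatenated
def pvCols (ags : List (List String)) (y d : Nat) : List String :=
  (List.range' y d).flatMap (pvColAt ags)
-- r elements drawn from col repeated cyclically (A's stalled tail)
def pvCycleTake (col : List String) (r : Nat) : List String :=
  if h : r = 0 ∨ col = [] then [] else col.take r ++ pvCycleTake col (r - col.length)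
termination_by r
decreasing_by
  push_neg at h
  have : 0 < col.length := List.length_pos_iff.mpr h.2
  omega
-- the flat list cut into chunks of k
def pvChunk (k : Nat) (xs : List String) : List (List String) :=
  if h : xs = [] ∨ k = 0 then [] else xs.take k :: pvChunk k (xs.drop k)
termination_by xs.length
decreasing_by
  push_neg at h
  have : 0 < xs.length := List.length_pos_iff.mpr h.1
  simp [List.length_drop]
  omega
-- A's sequence of groups[mc//k].append(e) updates
def pvFillSeq (k : Nat) : List (List String) → Nat → List String → List (List String)
  | groups, _, [] => groups
  | groups, m, e :: es => pvFillSeq k (pvAppendAt groups (m / k) e) (m+1) es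

theorem pvLoopA_done (ags : List (List String)) (k t fuel x y : Nat)
    (groups : List (List String)) : pvLoopA ags k t fuel x y t groups = groups := by
  cases fuel <;> simp [pvLoopA]

theorem pvFillSeq_append (k : Nat) (a b : List String) :
    ∀ (groups : List (List String)) (m : Nat),
    pvFillSeq k groups m (a ++ b) = pvFillSeq k (pvFillSeq k groups m a) (m + a.length) b := by
  induction a with
  | nil => intro g m; simp [pvFillSeq]
  | cons e es ih => intro g m; simp [pvFillSeq, ih]; ring_nf

theorem pvColAt_cons (g : List String) (gs : List (List String)) (y : Nat) :
    pvColAt (g :: gs) y =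
      if y < g.length then g.getD y "" :: pvColAt gs y else pvColAt gs y := by
  simp [pvColAt, List.filter_cons]
  split <;> simp_all

theorem pvCycleTake_zero (col : List String) : pvCycleTake col 0 = [] := by
  rw [pvCycleTake.eq_def]; simp

-- one pass over positions j, …, G-1 of a column y < len(last): every surviving group
-- contributes its element y, and y advances at the wrap
theorem pvColPass (ags : List (List String)) (k t : Nat) :
    ∀ (n j : Nat), j + n = ags.length → 0 < n →
    ∀ (kk y mc f : Nat) (groups : List (List String)),
      y < (ags.getD (ags.length - 1) []).length →
      mc + (pvColAt (ags.drop j) y).length ≤ t →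
      pvLoopA ags k t (n + f) (kk * ags.length + j) y mc groups =
        pvLoopA ags k t f ((kk + 1) * ags.length) (y + 1)
          (mc + (pvColAt (ags.drop j) y).length)
          (pvFillSeq k groups mc (pvColAt (ags.drop j) y)) := by
  intro n
  induction n with
  | zero => intro j hj h0; exact absurd h0 (by omega)
  | succ n ih =>
    intro j hj _ kk y mc f groups hy hmc
    have hG : 0 < ags.length := by omega
    have hj' : j < ags.length := by omega
    have hmod : (kk * ags.length + j) % ags.length = j := by
      rw [Nat.mul_comm kk ags.length, Nat.mul_add_mod]; exact Nat.mod_eq_of_lt hj'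
    have hgetD : ags.getD j [] = ags[j] := List.getD_eq_getElem ags [] hj'
    have hdrop : ags.drop j = ags[j] :: ags.drop (j + 1) := List.drop_eq_getElem_cons hj'
    by_cases hmt : mc = t
    · have hnil : pvColAt (ags.drop j) y = [] := List.length_eq_zero_iff.mp (by omega)
      rw [hnil]
      subst hmt
      simp [pvFillSeq, pvLoopA_done]
    · have hstep : n + 1 + f = (n + f) + 1 := by omega
      rw [hstep]
      rcases Nat.lt_or_ge j (ags.length - 1) with hjlt | hjge
      · -- middle position j < G-1: one step, then ih at j+1
        have hj1 : j + 1 < ags.length := by omega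
        have hwrapn : (kk * ags.length + j + 1) % ags.length = j + 1 := by
          have hx : kk * ags.length + j + 1 = kk * ags.length + (j + 1) := by omega
          rw [hx, Nat.mul_comm kk ags.length, Nat.mul_add_mod]; exact Nat.mod_eq_of_lt hj1
        have hx : kk * ags.length + j + 1 = kk * ags.length + (j + 1) := by omega
        by_cases hskip : ags[j].length ≤ y
        · have hcoleq : pvColAt (ags.drop j) y = pvColAt (ags.drop (j + 1)) y := by
            rw [hdrop, pvColAt_cons, if_neg (by omega)]
          rw [hcoleq] at hmc ⊢
          rw [pvLoopA, if_neg hmt, hmod, hgetD, if_pos hskip, hx]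
          exact ih (j + 1) (by omega) (by omega) kk y mc f groups hy hmc
        · have hcoleq : pvColAt (ags.drop j) y =
              ags[j].getD y "" :: pvColAt (ags.drop (j + 1)) y := by
            rw [hdrop, pvColAt_cons, if_pos (by omega)]
          rw [hcoleq] at hmc ⊢
          rw [pvLoopA, if_neg hmt, hmod, hgetD, if_neg hskip,
            if_neg (by rw [hwrapn]; omega), hx]
          have := ih (j + 1) (by omega) (by omega) kk y (mc + 1) f
            (pvAppendAt groups (mc / k) (ags[j].getD y "")) hy
            (by simp only [List.length_cons] at hmc; omega)
          rw [this]
          have harith : mc + 1 + (pvColAt (ags.drop (j + 1)) y).length =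
              mc + (ags[j].getD y "" :: pvColAt (ags.drop (j + 1)) y).length := by
            simp only [List.length_cons]; omega
          rw [harith]
          rfl
      · -- last position j = G-1: append with wrap
        have hj0 : j = ags.length - 1 := by omega
        have hn0 : n = 0 := by omega
        subst hn0
        have hy' : y < ags[j].length := by rw [← hj0] at hy; rwa [hgetD] at hy
        have hdropG : ags.drop (j + 1) = [] := by
          have hx : j + 1 = ags.length := by omega
          rw [hx]; exact List.drop_length
        have hcoleq : pvColAt (ags.drop j) y = [ags[j].getD y ""] := by
          rw [hdrop, pvColAt_cons, if_pos hy', hdropG]; simp [pvColAt]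
        rw [hcoleq] at hmc ⊢
        have hsm : (kk + 1) * ags.length = kk * ags.length + ags.length := Nat.succ_mul _ _
        have hxw : kk * ags.length + j + 1 = (kk + 1) * ags.length := by omega
        have hwrap0 : (kk * ags.length + j + 1) % ags.length = 0 := by
          rw [hxw]; exact Nat.mul_mod_left _ _
        rw [pvLoopA, if_neg hmt, hmod, hgetD, if_neg (by omega), if_pos hwrap0, hxw]
        have hf : 0 + f = f := by omega
        rw [hf]
        simp [pvFillSeq]

-- d whole columns starting at column y
theorem pvColsPass (ags : List (List String)) (k t : Nat) (hG : 0 < ags.length) :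
    ∀ (d y kk mc f : Nat) (groups : List (List String)),
      y + d ≤ (ags.getD (ags.length - 1) []).length →
      mc + (pvCols ags y d).length ≤ t →
      pvLoopA ags k t (d * ags.length + f) (kk * ags.length) y mc groups =
        pvLoopA ags k t f ((kk + d) * ags.length) (y + d)
          (mc + (pvCols ags y d).length) (pvFillSeq k groups mc (pvCols ags y d)) := by
  intro d
  induction d with
  | zero =>
    intro y kk mc f groups _ _
    simp [pvCols, pvFillSeq]
  | succ d ih =>
    intro y kk mc f groups hy hmc
    have hsplit : pvCols ags y (d + 1) = pvColAt ags y ++ pvCols ags (y + 1) d := by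
      simp [pvCols, List.range'_succ]
    rw [hsplit] at hmc ⊢
    have hsm : (d + 1) * ags.length = d * ags.length + ags.length := Nat.succ_mul _ _
    have hfuel : (d + 1) * ags.length + f = ags.length + (d * ags.length + f) := by omega
    rw [hfuel]
    have h0G : (0 : Nat) + ags.length = ags.length := by omega
    have hx0 : kk * ags.length = kk * ags.length + 0 := by omega
    rw [hx0]
    have hcp := pvColPass ags k t ags.length 0 (by omega) hG kk y mc
      (d * ags.length + f) groups (by omega) (by simp only [List.drop_zero] at *; simp at hmc ⊢; omega)
    rw [List.drop_zero] at hcp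
    rw [hcp]
    have := ih (y + 1) (kk + 1) (mc + (pvColAt ags y).length) f
      (pvFillSeq k groups mc (pvColAt ags y)) (by omega) (by simp at hmc ⊢; omega)
    rw [this]
    have h1 : kk + 1 + d = kk + (d + 1) := by omega
    have h2 : y + 1 + d = y + (d + 1) := by omega
    have h3 : mc + (pvColAt ags y).length + (pvCols ags (y + 1) d).length =
        mc + (pvColAt ags y ++ pvCols ags (y + 1) d).length := by
      simp only [List.length_append]; omega
    rw [h1, h2, h3, ← pvFillSeq_append]

-- tail phase, one full cycle: y = L is stuck (the last group is exhausted, so the wrap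
-- test never fires), the still-longer groups each contribute their element L once more
theorem pvTailPass (ags : List (List String)) (k t L : Nat)
    (hlast : (ags.getD (ags.length - 1) []).length ≤ L) :
    ∀ (n j : Nat), j + n = ags.length →
    ∀ (kk mc f : Nat) (groups : List (List String)),
      mc + (pvColAt (ags.drop j) L).length ≤ t →
      pvLoopA ags k t (n + f) (kk * ags.length + j) L mc groups =
        pvLoopA ags k t f ((kk + 1) * ags.length) L
          (mc + (pvColAt (ags.drop j) L).length)
          (pvFillSeq k groups mc (pvColAt (ags.drop j) L)) := by
  intro n
  induction n with
  | zero =>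
    intro j hj kk mc f groups _
    have hj0 : j = ags.length := by omega
    subst hj0
    rw [List.drop_length]
    have hsm : (kk + 1) * ags.length = kk * ags.length + ags.length := Nat.succ_mul _ _
    have hx2 : kk * ags.length + ags.length = (kk + 1) * ags.length := by omega
    simp only [pvColAt, List.filter_nil, List.map_nil, List.length_nil, Nat.add_zero, pvFillSeq]
    rw [show (0 : Nat) + f = f by omega, hx2]
  | succ n ih =>
    intro j hj kk mc f groups hmc
    have hG : 0 < ags.length := by omega
    have hj' : j < ags.length := by omega
    have hmod : (kk * ags.length + j) % ags.length = j := by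
      rw [Nat.mul_comm kk ags.length, Nat.mul_add_mod]; exact Nat.mod_eq_of_lt hj'
    have hgetD : ags.getD j [] = ags[j] := List.getD_eq_getElem ags [] hj'
    have hdrop : ags.drop j = ags[j] :: ags.drop (j + 1) := List.drop_eq_getElem_cons hj'
    by_cases hmt : mc = t
    · have hnil : pvColAt (ags.drop j) L = [] := List.length_eq_zero_iff.mp (by omega)
      rw [hnil]
      subst hmt
      simp [pvFillSeq, pvLoopA_done]
    · have hstep : n + 1 + f = (n + f) + 1 := by omega
      rw [hstep]
      have hx : kk * ags.length + j + 1 = kk * ags.length + (j + 1) := by omega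
      by_cases hskip : ags[j].length ≤ L
      · have hcoleq : pvColAt (ags.drop j) L = pvColAt (ags.drop (j + 1)) L := by
          rw [hdrop, pvColAt_cons, if_neg (by omega)]
        rw [hcoleq] at hmc ⊢
        rw [pvLoopA, if_neg hmt, hmod, hgetD, if_pos hskip, hx]
        exact ih (j + 1) (by omega) kk mc f groups hmc
      · -- append: j cannot be the last position (the last group has length ≤ L)
        have hjlast : j < ags.length - 1 := by
          rcases Nat.lt_or_ge j (ags.length - 1) with h | h
          · exact h
          · exfalso
            have hj0 : j = ags.length - 1 := by omega
            rw [← hj0] at hlast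
            rw [hgetD] at hlast
            omega
        have hj1 : j + 1 < ags.length := by omega
        have hwrapn : (kk * ags.length + j + 1) % ags.length = j + 1 := by
          rw [hx, Nat.mul_comm kk ags.length, Nat.mul_add_mod]; exact Nat.mod_eq_of_lt hj1
        have hcoleq : pvColAt (ags.drop j) L =
            ags[j].getD L "" :: pvColAt (ags.drop (j + 1)) L := by
          rw [hdrop, pvColAt_cons, if_pos (by omega)]
        rw [hcoleq] at hmc ⊢
        rw [pvLoopA, if_neg hmt, hmod, hgetD, if_neg hskip,
          if_neg (by rw [hwrapn]; omega), hx]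
        have := ih (j + 1) (by omega) kk (mc + 1) f
          (pvAppendAt groups (mc / k) (ags[j].getD L ""))
          (by simp only [List.length_cons] at hmc; omega)
        rw [this]
        have harith : mc + 1 + (pvColAt (ags.drop (j + 1)) L).length =
            mc + (ags[j].getD L "" :: pvColAt (ags.drop (j + 1)) L).length := by
          simp only [List.length_cons]; omega
        rw [harith]
        rfl

-- tail phase, final partial cycle: the loop stops the moment mc reaches t
theorem pvTailFinish (ags : List (List String)) (k t L : Nat)
    (hlast : (ags.getD (ags.length - 1) []).length ≤ L) :
    ∀ (n j : Nat), j + n = ags.length →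
    ∀ (kk mc f : Nat) (groups : List (List String)),
      t ≤ mc + (pvColAt (ags.drop j) L).length → mc ≤ t →
      pvLoopA ags k t (n + f) (kk * ags.length + j) L mc groups =
        pvFillSeq k groups mc ((pvColAt (ags.drop j) L).take (t - mc)) := by
  intro n
  induction n with
  | zero =>
    intro j hj kk mc f groups hge hle
    have hj0 : j = ags.length := by omega
    subst hj0
    rw [List.drop_length] at hge ⊢
    have hmt : mc = t := by
      simp only [pvColAt, List.filter_nil, List.map_nil, List.length_nil, Nat.add_zero] at hge
      omega
    subst hmt
    simp [pvColAt, pvFillSeq, pvLoopA_done]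
  | succ n ih =>
    intro j hj kk mc f groups hge hle
    have hG : 0 < ags.length := by omega
    have hj' : j < ags.length := by omega
    have hmod : (kk * ags.length + j) % ags.length = j := by
      rw [Nat.mul_comm kk ags.length, Nat.mul_add_mod]; exact Nat.mod_eq_of_lt hj'
    have hgetD : ags.getD j [] = ags[j] := List.getD_eq_getElem ags [] hj'
    have hdrop : ags.drop j = ags[j] :: ags.drop (j + 1) := List.drop_eq_getElem_cons hj'
    by_cases hmt : mc = t
    · subst hmt
      simp [pvFillSeq, pvLoopA_done]
    · have hstep : n + 1 + f = (n + f) + 1 := by omega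
      rw [hstep]
      have hx : kk * ags.length + j + 1 = kk * ags.length + (j + 1) := by omega
      by_cases hskip : ags[j].length ≤ L
      · have hcoleq : pvColAt (ags.drop j) L = pvColAt (ags.drop (j + 1)) L := by
          rw [hdrop, pvColAt_cons, if_neg (by omega)]
        rw [hcoleq] at hge ⊢
        rw [pvLoopA, if_neg hmt, hmod, hgetD, if_pos hskip, hx]
        exact ih (j + 1) (by omega) kk mc f groups hge hle
      · have hjlast : j < ags.length - 1 := by
          rcases Nat.lt_or_ge j (ags.length - 1) with h | h
          · exact h
          · exfalso
            have hj0 : j = ags.length - 1 := by omega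
            rw [← hj0] at hlast
            rw [hgetD] at hlast
            omega
        have hj1 : j + 1 < ags.length := by omega
        have hwrapn : (kk * ags.length + j + 1) % ags.length = j + 1 := by
          rw [hx, Nat.mul_comm kk ags.length, Nat.mul_add_mod]; exact Nat.mod_eq_of_lt hj1
        have hcoleq : pvColAt (ags.drop j) L =
            ags[j].getD L "" :: pvColAt (ags.drop (j + 1)) L := by
          rw [hdrop, pvColAt_cons, if_pos (by omega)]
        rw [hcoleq] at hge ⊢
        rw [pvLoopA, if_neg hmt, hmod, hgetD, if_neg hskip,
          if_neg (by rw [hwrapn]; omega), hx]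
        have := ih (j + 1) (by omega) kk (mc + 1) f
          (pvAppendAt groups (mc / k) (ags[j].getD L ""))
          (by simp only [List.length_cons] at hge; omega) (by omega)
        rw [this]
        have htk : (ags[j].getD L "" :: pvColAt (ags.drop (j + 1)) L).take (t - mc) =
            ags[j].getD L "" :: (pvColAt (ags.drop (j + 1)) L).take (t - (mc + 1)) := by
          have h1 : t - mc = (t - (mc + 1)) + 1 := by omega
          rw [h1, List.take_succ_cons]
        rw [htk]
        rfl

-- the whole tail: cycle column L until mc reaches t
theorem pvTailLoop (ags : List (List String)) (k t L : Nat) (hG : 0 < ags.length)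
    (hlast : (ags.getD (ags.length - 1) []).length ≤ L) :
    ∀ (rem : Nat), ∀ (mc kk f : Nat) (groups : List (List String)),
      t ≤ mc + rem → mc ≤ t → (pvColAt ags L = [] → t ≤ mc) →
      pvLoopA ags k t (rem * ags.length + ags.length + f) (kk * ags.length) L mc groups =
        pvFillSeq k groups mc (pvCycleTake (pvColAt ags L) (t - mc)) := by
  intro rem
  induction rem using Nat.strong_induction_on with
  | _ rem ih =>
    intro mc kk f groups hrem hle hc
    by_cases hmt : mc = t
    · subst hmt
      rw [Nat.sub_self, pvCycleTake_zero]
      simp [pvFillSeq, pvLoopA_done]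
    · have hlt : mc < t := by omega
      have hcol : pvColAt ags L ≠ [] := fun h => absurd (hc h) (by omega)
      have hclen : 0 < (pvColAt ags L).length := List.length_pos_iff.mpr hcol
      by_cases hfin : t ≤ mc + (pvColAt ags L).length
      · -- final (partial) cycle
        have hfuel : rem * ags.length + ags.length + f =
            ags.length + (rem * ags.length + f) := by omega
        rw [hfuel]
        have hx0 : kk * ags.length = kk * ags.length + 0 := by omega
        rw [hx0]
        have := pvTailFinish ags k t L hlast ags.length 0 (by omega) kk mc
          (rem * ags.length + f) groups (by rw [List.drop_zero]; omega) hle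
        rw [List.drop_zero] at this
        rw [this]
        have hct : pvCycleTake (pvColAt ags L) (t - mc) = (pvColAt ags L).take (t - mc) := by
          rw [pvCycleTake.eq_def]
          rw [dif_neg (by push_neg; exact ⟨by omega, hcol⟩)]
          have h0 : t - mc - (pvColAt ags L).length = 0 := by omega
          rw [h0, pvCycleTake_zero, List.append_nil]
        rw [hct]
      · -- one full cycle, then recurse
        push_neg at hfin
        have hlc : (pvColAt ags L).length ≤ rem := by omega
        have hrem1 : 1 ≤ rem := by omega
        have hprod1 : (rem - (pvColAt ags L).length) * ags.length +
            (pvColAt ags L).length * ags.length = rem * ags.length := by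
          rw [← Nat.add_mul, Nat.sub_add_cancel hlc]
        have hprod2 : (pvColAt ags L).length * ags.length =
            ((pvColAt ags L).length - 1) * ags.length + ags.length := by
          have h1 : (pvColAt ags L).length = ((pvColAt ags L).length - 1) + 1 := by omega
          conv_lhs => rw [h1]
          rw [Nat.succ_mul]
        have hfuel : rem * ags.length + ags.length + f =
            ags.length + ((rem - (pvColAt ags L).length) * ags.length + ags.length +
              (((pvColAt ags L).length - 1) * ags.length + f)) := by omega
        rw [hfuel]
        have hx0 : kk * ags.length = kk * ags.length + 0 := by omega
        rw [hx0]
        have htp := pvTailPass ags k t L hlast ags.length 0 (by omega) kk mc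
          ((rem - (pvColAt ags L).length) * ags.length + ags.length +
            (((pvColAt ags L).length - 1) * ags.length + f)) groups
          (by rw [List.drop_zero]; omega)
        rw [List.drop_zero] at htp
        rw [htp]
        have := ih (rem - (pvColAt ags L).length) (by omega)
          (mc + (pvColAt ags L).length) (kk + 1)
          (((pvColAt ags L).length - 1) * ags.length + f)
          (pvFillSeq k groups mc (pvColAt ags L)) (by omega) (by omega)
          (fun h => absurd h hcol)
        rw [this]
        rw [← pvFillSeq_append]
        have hct : pvCycleTake (pvColAt ags L) (t - mc) =
            pvColAt ags L ++ pvCycleTake (pvColAt ags L) (t - (mc + (pvColAt ags L).length)) := by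
          conv_lhs => rw [pvCycleTake.eq_def]
          rw [dif_neg (by push_neg; exact ⟨by omega, hcol⟩)]
          rw [List.take_of_length_le (by omega)]
          have harg : t - mc - (pvColAt ags L).length =
              t - (mc + (pvColAt ags L).length) := by omega
          rw [harg]
        rw [hct]

-- arithmetic facts about the columns
theorem pvCols_succ (ags : List (List String)) (L : Nat) :
    pvCols ags 0 (L + 1) = pvCols ags 0 L ++ pvColAt ags L := by
  have h := List.range'_concat (s := 0) (n := L) (step := 1)
  simp only [Nat.one_mul, Nat.zero_add] at h
  simp [pvCols, h, List.flatMap_append]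

theorem pvMinSum_succ (L : Nat) (ags : List (List String)) :
    (ags.map (fun g => min g.length (L + 1))).sum =
      (ags.map (fun g => min g.length L)).sum +
        (ags.filter (fun g => L < g.length)).length := by
  induction ags with
  | nil => simp
  | cons g gs ih =>
    simp only [List.map_cons, List.sum_cons, List.filter_cons]
    by_cases h : L < g.length <;> simp [h, ih] <;> omega

theorem pvCols_length (ags : List (List String)) :
    ∀ L, (pvCols ags 0 L).length = (ags.map (fun g => min g.length L)).sum := by
  intro L
  induction L with
  | zero => simp [pvCols]
  | succ L ih =>
    rw [pvCols_succ, List.length_append, ih, pvMinSum_succ]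
    simp [pvColAt]

theorem pvColsSum_le (ags : List (List String)) (L : Nat) :
    (ags.map (fun g => min g.length L)).sum ≤ pvTotal ags := by
  unfold pvTotal
  exact List.sum_le_sum (fun g _ => min_le_left _ _)

theorem pvColAt_nil_total (ags : List (List String)) (L : Nat)
    (h : pvColAt ags L = []) : (ags.map (fun g => min g.length L)).sum = pvTotal ags := by
  have hf : ags.filter (fun g => L < g.length) = [] := by
    have := (List.map_eq_nil_iff).mp h
    exact this
  have hall := List.filter_eq_nil_iff.mp hf
  unfold pvTotal
  congr 1
  apply List.map_congr_left
  intro g hg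
  have := hall g hg
  simp at this
  omega

theorem pvCycleTake_length (col : List String) (hc : col ≠ []) :
    ∀ r, (pvCycleTake col r).length = r := by
  have hclen : 0 < col.length := List.length_pos_iff.mpr hc
  intro r
  induction r using Nat.strong_induction_on with
  | _ r ih =>
    rw [pvCycleTake.eq_def]
    by_cases h0 : r = 0
    · simp [h0]
    · rw [dif_neg (by push_neg; exact ⟨h0, hc⟩)]
      simp only [List.length_append, List.length_take]
      rw [ih (r - col.length) (by omega)]
      omega

-- chunking: A's placement groups[mc//k].append is exactly "cut the flat list into
-- chunks of k" filled left to right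
theorem pvChunk_nil (k : Nat) : pvChunk k [] = [] := by rw [pvChunk.eq_def]; simp

theorem pvChunk_small (k : Nat) (xs : List String) (h0 : xs ≠ []) (h : xs.length ≤ k) :
    pvChunk k xs = [xs] := by
  have h1 : 0 < xs.length := List.length_pos_iff.mpr h0
  have hk : k ≠ 0 := by omega
  rw [pvChunk.eq_def]
  rw [dif_neg (by push_neg; exact ⟨h0, hk⟩)]
  rw [List.take_of_length_le h, List.drop_eq_nil_of_le h, pvChunk_nil]

theorem pvChunk_step (k : Nat) (xs : List String) (h0 : xs ≠ []) (hk : k ≠ 0) :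
    pvChunk k xs = xs.take k :: pvChunk k (xs.drop k) := by
  rw [pvChunk.eq_def]; simp [h0, hk]

theorem pvChunk_length_bounds (k : Nat) (hk : k ≠ 0) :
    ∀ (N : Nat) (xs : List String), xs.length ≤ N →
      xs.length ≤ (pvChunk k xs).length * k ∧
        (pvChunk k xs).length * k < xs.length + k := by
  intro N
  induction N with
  | zero =>
    intro xs h
    have hx : xs = [] := List.length_eq_zero_iff.mp (by omega)
    subst hx
    simp [pvChunk_nil]
    omega
  | succ N ih =>
    intro xs h
    by_cases hx : xs = []
    · subst hx; simp [pvChunk_nil]; omega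
    · have h1 : 0 < xs.length := List.length_pos_iff.mpr hx
      by_cases hs : xs.length ≤ k
      · rw [pvChunk_small k xs hx hs]; simp; omega
      · push_neg at hs
        rw [pvChunk_step k xs hx hk]
        have hdl : (xs.drop k).length = xs.length - k := by simp
        have hb := ih (xs.drop k) (by omega)
        rw [hdl] at hb
        simp only [List.length_cons]
        rw [Nat.succ_mul]
        omega

theorem pvAppendAt_cons_zero (g : List String) (gs : List (List String)) (s : String) :
    pvAppendAt (g :: gs) 0 s = (g ++ [s]) :: gs := by simp [pvAppendAt, List.modify]

theorem pvAppendAt_cons_succ (g : List String) (gs : List (List String)) (i : Nat) (s : String) :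
    pvAppendAt (g :: gs) (i + 1) s = g :: pvAppendAt gs i s := by simp [pvAppendAt, List.modify]

theorem pvFillAt (k : Nat) (hk : k ≠ 0) :
    ∀ (N : Nat) (p : List String) (n : Nat) (a : String), p.length ≤ N → p.length < n * k →
      pvAppendAt (pvChunk k p ++ List.replicate (n - (pvChunk k p).length) []) (p.length / k) a =
        pvChunk k (p ++ [a]) ++ List.replicate (n - (pvChunk k (p ++ [a])).length) [] := by
  intro N
  induction N with
  | zero =>
    intro p n a hN hlt
    have hp : p = [] := List.length_eq_zero_iff.mp (by omega)
    subst hp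
    have hn : 0 < n := by
      rcases Nat.eq_zero_or_pos n with h | h
      · subst h; simp at hlt
      · exact h
    have hrep : List.replicate n ([] : List String) = [] :: List.replicate (n - 1) [] := by
      conv_lhs => rw [show n = (n - 1) + 1 by omega]
      rw [List.replicate_succ]
    simp only [pvChunk_nil, List.length_nil, List.nil_append, Nat.zero_div, Nat.sub_zero]
    rw [hrep, pvAppendAt_cons_zero]
    rw [pvChunk_small k [a] (by simp) (by simp; omega)]
    simp
  | succ N ihN =>
    intro p n a hN hlt
    by_cases hp : p = []
    · exact ihN p n a (by simp [hp]) hlt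
    · have hplen : 0 < p.length := List.length_pos_iff.mpr hp
      have hn : 0 < n := by
        rcases Nat.eq_zero_or_pos n with h | h
        · subst h; simp at hlt
        · exact h
      by_cases hsmall : p.length < k
      · rw [pvChunk_small k p hp (by omega),
          pvChunk_small k (p ++ [a]) (by simp) (by simp; omega),
          Nat.div_eq_of_lt hsmall]
        simp only [List.length_cons, List.length_nil, List.singleton_append]
        rw [pvAppendAt_cons_zero]
      · push_neg at hsmall
        have hstep1 : pvChunk k p = p.take k :: pvChunk k (p.drop k) :=
          pvChunk_step k p hp hk
        have hstep2 : pvChunk k (p ++ [a]) = p.take k :: pvChunk k (p.drop k ++ [a]) := by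
          rw [pvChunk_step k _ (by simp) hk, List.take_append_of_le_length hsmall,
            List.drop_append_of_le_length hsmall]
        have hdiv : p.length / k = (p.length - k) / k + 1 :=
          Nat.div_eq_sub_div (by omega) hsmall
        rw [hstep1, hstep2, hdiv]
        simp only [List.length_cons, List.cons_append]
        rw [pvAppendAt_cons_succ]
        have hdl : (p.drop k).length = p.length - k := by simp
        have hnm : (n - 1) * k = n * k - k := by rw [Nat.sub_mul, Nat.one_mul]
        have hih := ihN (p.drop k) (n - 1) a (by omega) (by rw [hdl, hnm]; omega)
        have hcnt1 : n - ((pvChunk k (p.drop k)).length + 1) =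
            (n - 1) - (pvChunk k (p.drop k)).length := by omega
        have hcnt2 : n - ((pvChunk k (p.drop k ++ [a])).length + 1) =
            (n - 1) - (pvChunk k (p.drop k ++ [a])).length := by omega
        rw [hcnt1, hcnt2, ← hdl, hih]

theorem pvFillChunks (k : Nat) (hk : k ≠ 0) :
    ∀ (s : List String) (n : Nat) (p : List String), p.length + s.length ≤ n * k →
      pvFillSeq k (pvChunk k p ++ List.replicate (n - (pvChunk k p).length) []) p.length s =
        pvChunk k (p ++ s) ++ List.replicate (n - (pvChunk k (p ++ s)).length) [] := by
  intro s
  induction s with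
  | nil => intro n p h; simp [pvFillSeq]
  | cons e s' ih =>
    intro n p h
    simp only [pvFillSeq]
    rw [pvFillAt k hk p.length p n e le_rfl (by simp at h; omega)]
    rw [show p.length + 1 = (p ++ [e]).length by simp]
    rw [ih n (p ++ [e]) (by simp at h ⊢; omega)]
    simp [List.append_assoc]

-- the reduce(...) in both programs is the total attendee count
theorem pvIntTotal (ags : List (List String)) :
    ∀ c : Int, ags.foldl (fun c g => c + (g.length : Int)) c = c + (pvTotal ags : Int) := by
  induction ags with
  | nil => intro c; simp [pvTotal]
  | cons g gs ih => intro c; simp [pvTotal, ih, List.sum_cons] at *; push_cast; ring_nf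

-- ===== B-side lemmas =====
theorem pvColsFold (ags : List (List String)) :
    ∀ L : Nat, (List.range L).foldl pvColStep (ags, []) =
      (ags.filter (fun g => L ≤ g.length), pvCols ags 0 L) := by
  intro L
  induction L with
  | zero =>
    have hself : ags.filter (fun g => (0 : Nat) ≤ g.length) = ags :=
      List.filter_eq_self.mpr (fun a _ => decide_eq_true (Nat.zero_le _))
    rw [hself]
    simp [pvCols]
  | succ L ih =>
    rw [List.range_succ, List.foldl_append, ih]
    simp only [List.foldl_cons, List.foldl_nil]
    unfold pvColStep
    have hff : (ags.filter (fun g => decide (L ≤ g.length))).filter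
        (fun g => decide (L < g.length)) = ags.filter (fun g => decide (L < g.length)) := by
      rw [List.filter_filter]
      apply List.filter_congr
      intro g _
      by_cases h : L < g.length <;> simp [h] <;> omega
    have hnext : ags.filter (fun g => decide (L < g.length)) =
        ags.filter (fun g => decide (L + 1 ≤ g.length)) := by
      apply List.filter_congr
      intro g _
      exact decide_eq_decide.mpr (by omega)
    simp only [hff]
    rw [PySem.List.foldl_append_singleton_eq_map]
    rw [pvCols_succ]
    rw [hnext]
    rfl

-- the fold max(map(len, ags), 0) bounds every group length and is attained or 0
theorem pvFoldMax_init (l : List Nat) : ∀ a : Nat, a ≤ l.foldl Nat.max a := by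
  induction l with
  | nil => intro a; simp
  | cons h t ih =>
    intro a
    simpa using le_trans (Nat.le_max_left a h) (ih (Nat.max a h))

theorem pvFoldMax_mem (l : List Nat) : ∀ (a x : Nat), x ∈ l → x ≤ l.foldl Nat.max a := by
  induction l with
  | nil => intro a x hx; cases hx
  | cons h t ih =>
    intro a x hx
    simp only [List.foldl_cons]
    rcases List.mem_cons.mp hx with rfl | hx
    · exact le_trans (Nat.le_max_right a x) (pvFoldMax_init t _)
    · exact ih _ x hx

theorem pvFoldMax_ge (ags : List (List String)) (a : Nat) (g : List String) (hg : g ∈ ags) :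
    g.length ≤ (ags.map List.length).foldl Nat.max a :=
  pvFoldMax_mem _ a _ (List.mem_map_of_mem hg)

theorem pvFoldMax_le (ags : List (List String)) :
    ∀ (a c : Nat), a ≤ c → (∀ g ∈ ags, g.length ≤ c) →
      (ags.map List.length).foldl Nat.max a ≤ c := by
  induction ags with
  | nil => intro a c ha _; simpa using ha
  | cons h t ih =>
    intro a c ha hall
    simp only [List.map_cons, List.foldl_cons]
    exact ih _ c (Nat.max_le.mpr ⟨ha, hall h (by simp)⟩)
      (fun g hg => hall g (by simp [hg]))

-- columns at or beyond every group's length are empty, so pvCols stabilises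
theorem pvColAt_high (ags : List (List String)) (y : Nat)
    (h : ∀ g ∈ ags, g.length ≤ y) : pvColAt ags y = [] := by
  unfold pvColAt
  rw [List.filter_eq_nil_iff.mpr (fun g hg => by simpa using Nat.not_lt.mpr (h g hg))]
  rfl

theorem pvCols_stable (ags : List (List String)) (M : Nat)
    (h : ∀ g ∈ ags, g.length ≤ M) :
    ∀ d, pvCols ags 0 (M + d) = pvCols ags 0 M := by
  intro d
  induction d with
  | zero => rfl
  | succ d ih =>
    rw [show M + (d + 1) = (M + d) + 1 by omega, pvCols_succ, ih,
      pvColAt_high ags (M + d) (fun g hg => by have := h g hg; omega)]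
    simp

-- under ¬D_ the leftover after the first L columns is exactly column L, once
theorem pvTotal_split (ags : List (List String)) (L : Nat)
    (h : ∀ g ∈ ags, g.length ≤ L + 1) :
    pvTotal ags = (ags.map (fun g => min g.length L)).sum +
      (ags.filter (fun g => L < g.length)).length := by
  induction ags with
  | nil => simp [pvTotal]
  | cons g gs ih =>
    have hg := h g (by simp)
    have hrec := ih (fun g hg => h g (by simp [hg]))
    unfold pvTotal at *
    simp only [List.map_cons, List.sum_cons, List.filter_cons]
    by_cases hc : L < g.length
    · simp only [hc, decide_true, if_true, List.length_cons]
      rw [Nat.min_eq_right (by omega : L ≤ g.length)]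
      omega
    · simp only [hc, decide_false, Bool.false_eq_true, if_false]
      push_neg at hc
      rw [Nat.min_eq_left hc]
      omega

theorem pvChunkMapRange (k : Nat) (hk : k ≠ 0) :
    ∀ (N : Nat) (flat : List String), flat.length ≤ N →
      (List.range ((flat.length + k - 1) / k)).map
        (fun i => (flat.drop (k * i)).take k) = pvChunk k flat := by
  intro N
  induction N with
  | zero =>
    intro flat h
    have hf : flat = [] := List.length_eq_zero_iff.mp (by omega)
    subst hf
    rw [pvChunk_nil]
    have h0 : ([] : List String).length + k - 1 = k - 1 := by simp
    rw [h0, Nat.div_eq_of_lt (by omega)]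
    rfl
  | succ N ih =>
    intro flat h
    by_cases hf : flat = []
    · subst hf
      rw [pvChunk_nil]
      have h0 : ([] : List String).length + k - 1 = k - 1 := by simp
      rw [h0, Nat.div_eq_of_lt (by omega)]
      rfl
    · have hfl : 0 < flat.length := List.length_pos_iff.mpr hf
      have hm : (flat.length + k - 1) / k = (flat.length - 1) / k + 1 := by
        rw [Nat.div_eq_sub_div (by omega) (by omega),
          show flat.length + k - 1 - k = flat.length - 1 by omega]
      rw [hm, List.range_succ_eq_map]
      simp only [List.map_cons, List.map_map]
      rw [pvChunk_step k flat hf hk]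
      congr 1
      have htail : ∀ i ∈ List.range ((flat.length - 1) / k),
          ((fun i => (flat.drop (k * i)).take k) ∘ Nat.succ) i =
            ((flat.drop k).drop (k * i)).take k := by
        intro i _
        simp only [Function.comp_apply, Nat.succ_eq_add_one]
        rw [List.drop_drop, show k + k * i = k * (i + 1) by ring]
      rw [List.map_congr_left htail]
      have hml : ((flat.drop k).length + k - 1) / k = (flat.length - 1) / k := by
        have hdl : (flat.drop k).length = flat.length - k := by simp
        rw [hdl]
        by_cases hbig : k ≤ flat.length
        · congr 1; omega
        · rw [show flat.length - k = 0 by omega,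
            Nat.div_eq_of_lt (show 0 + k - 1 < k by omega),
            Nat.div_eq_of_lt (by omega)]
      rw [← hml]
      exact ih (flat.drop k) (by simp; omega)

theorem pvChunkFold (limit : Int) (hl : 0 < limit) (flat : List String) :
    (PySem.List.pyRange 0 (flat.length : Int) limit).foldl
      (fun out i => out ++ [PySem.List.slice flat (some i) (some (i + limit))]) [] =
      pvChunk limit.toNat flat := by
  have hkI : ((limit.toNat : Int)) = limit := Int.toNat_of_nonneg (by omega)
  have hk0 : limit.toNat ≠ 0 := by omega
  rw [PySem.List.pyRange_of_pos 0 (flat.length : Int) hl]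
  rw [PySem.List.foldl_append_singleton_eq_map]
  simp only [List.map_map, List.nil_append]
  by_cases hf : flat = []
  · subst hf
    simp [pvChunk_nil]
  · have hfl : 0 < flat.length := List.length_pos_iff.mpr hf
    have hcnt : (if (0 : Int) < (flat.length : Int) then
        (((flat.length : Int) - 0 + limit - 1) / limit).toNat else 0) =
        (flat.length + limit.toNat - 1) / limit.toNat := by
      rw [if_pos (by exact_mod_cast hfl)]
      have h1 : (flat.length : Int) - 0 + limit - 1 =
          ((flat.length + limit.toNat - 1 : Nat) : Int) := by
        rw [← hkI]; omega
      rw [h1, ← hkI]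
      simp only [Int.toNat_natCast]
      rw [← Int.natCast_div, Int.toNat_natCast]
    rw [hcnt]
    have hfn : ∀ i ∈ List.range ((flat.length + limit.toNat - 1) / limit.toNat),
        ((fun i => PySem.List.slice flat (some i) (some (i + limit))) ∘
          (fun j : Nat => (0 : Int) + limit * (j : Int))) i =
          (flat.drop (limit.toNat * i)).take limit.toNat := by
      intro i _
      simp only [Function.comp_apply]
      have hi : (0 : Int) ≤ (i : Int) := Int.natCast_nonneg i
      have hmul : (0 : Int) ≤ limit * (i : Int) := mul_nonneg (by omega) hi
      rw [PySem.List.slice_toNat flat (by omega) (by omega)]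
      have ha : ((0 : Int) + limit * (i : Int)).toNat = limit.toNat * i := by
        have h2 : (0 : Int) + limit * (i : Int) = ((limit.toNat * i : Nat) : Int) := by
          rw [Int.natCast_mul, hkI]; ring
        rw [h2, Int.toNat_natCast]
      have hb : ((0 : Int) + limit * (i : Int) + limit).toNat =
          limit.toNat * i + limit.toNat := by
        have h2 : (0 : Int) + limit * (i : Int) + limit =
            ((limit.toNat * i + limit.toNat : Nat) : Int) := by
          rw [Int.natCast_add, Int.natCast_mul, hkI]; ring
        rw [h2, Int.toNat_natCast]
      rw [ha, hb, show limit.toNat * i + limit.toNat - limit.toNat * i = limit.toNat by omega]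
    rw [List.map_congr_left hfn]
    exact pvChunkMapRange limit.toNat hk0 flat.length flat le_rfl

-- ===== VERDICT (by name: the statement is the Claim_ definition above) =====
theorem group_size_distribute_spec : Claim_unchanged_group_size_distribute := by
  intro ags limit _ hpre
  unfold Spec_group_size_distribute
  intro hD
  unfold D_group_size_distribute at hD
  push_neg at hD
  simp only [group_size_distribute, group_size_distribute_alt]
  rw [pvIntTotal ags 0]
  simp only [zero_add, Int.toNat_natCast]
  set T := pvTotal ags with hTdef
  set M := (ags.map List.length).foldl Nat.max 0 with hMdef
  have hMub : ∀ g ∈ ags, g.length ≤ M := fun g hg => pvFoldMax_ge ags 0 g hg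
  by_cases hT0 : T = 0
  · -- no attendees at all: both programs return []
    rw [hT0]
    have hfd : (-PySem.Int.floordiv (-((0 : Nat) : Int)) limit).toNat = 0 := by
      simp [PySem.Int.floordiv]
    rw [hfd]
    simp only [List.replicate_zero]
    rw [pvLoopA_done]
    -- B side: every group is empty, so M = 0 and flat = []
    have hz := List.sum_eq_zero_iff.mp (show (ags.map List.length).sum = 0 by
      rw [← pvTotal]; omega)
    have hM0 : M = 0 := by
      have := pvFoldMax_le ags 0 0 le_rfl
        (fun g hg => by have := hz g.length (List.mem_map_of_mem hg); omega)
      omega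
    rw [hM0]
    simp only [List.range_zero, List.foldl_nil, List.length_nil]
    have hpr : PySem.List.pyRange 0 ((0 : Nat) : Int) limit = [] := by
      have hlim : limit ≠ 0 := by rcases hpre with h | ⟨h, _⟩ <;> omega
      simp [PySem.List.pyRange, hlim]
    rw [hpr]
    rfl
  · have hTpos : 0 < T := Nat.pos_of_ne_zero hT0
    have hl : 0 < limit := by
      rcases hpre with h | ⟨hneg, hall⟩
      · exact h
      · exfalso
        have hz : pvTotal ags = 0 := by
          unfold pvTotal
          rw [List.sum_eq_zero_iff]
          intro x hx
          obtain ⟨g, hg, rfl⟩ := List.mem_map.mp hx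
          rw [hall g hg]
          rfl
        omega
    set k := limit.toNat with hkdef
    have hk0 : k ≠ 0 := by omega
    have hkI : (k : Int) = limit := Int.toNat_of_nonneg (by omega)
    have hags : ags ≠ [] := by
      intro h
      apply hT0
      rw [hTdef, h]
      rfl
    have hG : 0 < ags.length := List.length_pos_iff.mpr hags
    set L := (ags.getD (ags.length - 1) []).length with hLdef
    have hlastD : (ags.getLast?.getD []).length = L := by
      have h1 : ags.getLast? = some (ags[ags.length - 1]) := by
        rw [List.getLast?_eq_getElem?]
        exact List.getElem?_eq_getElem (by omega)
      rw [h1, Option.getD_some, hLdef, List.getD_eq_getElem ags [] (by omega)]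
    have hDle : ∀ g ∈ ags, g.length ≤ L + 1 := by
      intro g hg
      have := hD g hg
      rw [hlastD] at this
      omega
    have hLT : L ≤ T := by
      have hmem : ags[ags.length - 1] ∈ ags := List.getElem_mem _
      have hmm : ags[ags.length - 1].length ∈ ags.map List.length := List.mem_map_of_mem hmem
      have hle := List.le_sum_of_mem hmm
      rw [hTdef]
      unfold pvTotal
      rw [hLdef, List.getD_eq_getElem ags [] (by omega)]
      exact hle
    -- the ceiling division: T ≤ n·k and (n-1)·k < T
    set q := -PySem.Int.floordiv (-((T : Nat) : Int)) limit with hqdef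
    obtain ⟨hbr1, hbr2⟩ :=
      (PySem.Int.neg_floordiv_neg_eq_iff_of_pos (a := ((T : Nat) : Int)) (q := q) hl).mp rfl
    have hq0 : 0 ≤ q := by
      by_contra hh
      push_neg at hh
      have h1 : q * limit ≤ (-1) * limit := by
        apply mul_le_mul_of_nonneg_right (by omega) (by omega)
      have h2 : (0 : Int) ≤ ((T : Nat) : Int) := Int.natCast_nonneg _
      omega
    set n := q.toNat with hndef
    have hqn : q = (n : Int) := by omega
    have hTnk : T ≤ n * k := by
      have h1 : ((T : Nat) : Int) ≤ ((n : Nat) : Int) * ((k : Nat) : Int) := by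
        rw [← hqn, hkI]; exact hbr2
      exact_mod_cast h1
    have hn1 : 1 ≤ n := by
      by_contra hh
      push_neg at hh
      have hz : n = 0 := by omega
      rw [hz] at hTnk
      simp at hTnk
      omega
    have hnk1 : (n - 1) * k < T := by
      have h3 : ((n - 1 : Nat) : Int) = (n : Int) - 1 := by omega
      have h2 : ((n - 1 : Nat) : Int) * ((k : Nat) : Int) < ((T : Nat) : Int) := by
        rw [h3, ← hqn, hkI]; exact hbr1
      exact_mod_cast h2
    -- flat sequence
    set m1 := (pvCols ags 0 L).length with hm1def
    have hm1sum : m1 = (ags.map (fun g => min g.length L)).sum := pvCols_length ags L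
    have hm1T : m1 ≤ T := by
      rw [hm1sum, hTdef]
      exact pvColsSum_le ags L
    have hcolnil : pvColAt ags L = [] → T ≤ m1 := by
      intro h
      rw [hm1sum, pvColAt_nil_total ags L h, hTdef]
    set xs := pvCols ags 0 L ++ pvCycleTake (pvColAt ags L) (T - m1) with hxsdef
    have hxslen : xs.length = T := by
      rw [hxsdef]
      simp only [List.length_append, ← hm1def]
      by_cases hcm : T ≤ m1
      · rw [show T - m1 = 0 by omega, pvCycleTake_zero]
        simp
        omega
      · have hcol : pvColAt ags L ≠ [] := fun h => absurd (hcolnil h) (by omega)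
        rw [pvCycleTake_length _ hcol]
        omega
    -- A computes the fill of xs
    have hlastle : (ags.getD (ags.length - 1) []).length ≤ L := le_of_eq hLdef.symm
    have hfuelle : L * ags.length + (T * ags.length + ags.length) ≤
        (T + 1) * (ags.length + 1) * 2 := by
      have h1 : L * ags.length ≤ T * ags.length := Nat.mul_le_mul_right ags.length hLT
      have h2 : (T + 1) * (ags.length + 1) * 2 =
          T * ags.length * 2 + T * 2 + ags.length * 2 + 2 := by ring
      omega
    have hA : pvLoopA ags k T ((T + 1) * (ags.length + 1) * 2) 0 0 0 (List.replicate n []) =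
        pvFillSeq k (List.replicate n []) 0 xs := by
      have hfe : (T + 1) * (ags.length + 1) * 2 =
          L * ags.length + (T * ags.length + ags.length +
            ((T + 1) * (ags.length + 1) * 2 -
              (L * ags.length + (T * ags.length + ags.length)))) := by
        omega
      rw [hfe]
      rw [show pvLoopA ags k T
          (L * ags.length + (T * ags.length + ags.length +
            ((T + 1) * (ags.length + 1) * 2 -
              (L * ags.length + (T * ags.length + ags.length)))))
          0 0 0 (List.replicate n []) = pvLoopA ags k T
          (L * ags.length + (T * ags.length + ags.length +
            ((T + 1) * (ags.length + 1) * 2 -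
              (L * ags.length + (T * ags.length + ags.length)))))
          (0 * ags.length) 0 0 (List.replicate n []) by norm_num]
      rw [pvColsPass ags k T hG L 0 0 0 _ (List.replicate n []) (by omega)
        (by have := hm1T; rw [hm1def] at this; omega)]
      simp only [Nat.zero_add]
      rw [← hm1def]
      have htl := pvTailLoop ags k T L hG hlastle T m1 L
        ((T + 1) * (ags.length + 1) * 2 - (L * ags.length + (T * ags.length + ags.length)))
        (pvFillSeq k (List.replicate n []) 0 (pvCols ags 0 L)) (by omega) hm1T hcolnil
      rw [htl]
      rw [hxsdef, pvFillSeq_append]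
      rw [← hm1def]
      simp
    rw [hA]
    -- the fill is the chunking
    have hfc := pvFillChunks k hk0 xs n [] (by simp [hxslen]; omega)
    simp only [pvChunk_nil, List.length_nil, List.nil_append, Nat.sub_zero] at hfc
    rw [hfc]
    have hlenC : (pvChunk k xs).length = n := by
      have hb := pvChunk_length_bounds k hk0 xs.length xs le_rfl
      rw [hxslen] at hb
      have hsm : (n + 1) * k = n * k + k := Nat.succ_mul _ _
      have hlt1 : (pvChunk k xs).length * k < (n + 1) * k := by omega
      have hle1 : (pvChunk k xs).length < n + 1 := Nat.lt_of_mul_lt_mul_right hlt1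
      have hlt2 : (n - 1) * k < (pvChunk k xs).length * k := by omega
      have hle2 : n - 1 < (pvChunk k xs).length := Nat.lt_of_mul_lt_mul_right hlt2
      omega
    rw [hlenC, Nat.sub_self, List.replicate_zero, List.append_nil]
    -- B side: xs = pvCols ags 0 M (each attendee exactly once, under ¬D_)
    have hxsM : xs = pvCols ags 0 M := by
      by_cases hcol : pvColAt ags L = []
      · -- every group has length ≤ L, so M ≤ L and the extra columns are empty
        have hTm : T = m1 := le_antisymm (hcolnil hcol) hm1T
        have hle : ∀ g ∈ ags, g.length ≤ L := by
          intro g hg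
          by_contra hh
          push_neg at hh
          have : g ∈ ags.filter (fun g => L < g.length) :=
            List.mem_filter.mpr ⟨hg, by simpa using hh⟩
          rw [show ags.filter (fun g => L < g.length) = [] from
            (List.map_eq_nil_iff).mp hcol] at this
          cases this
        have hML : M ≤ L := pvFoldMax_le ags 0 L (by omega) hle
        rw [hxsdef, show T - m1 = 0 by omega, pvCycleTake_zero, List.append_nil]
        rw [show L = M + (L - M) by omega]
        exact pvCols_stable ags M hMub (L - M)
      · -- some group has length L + 1, so M = L + 1 and the tail is column L, once
        have hML : M ≤ L + 1 := pvFoldMax_le ags 0 (L + 1) (by omega) hDle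
        obtain ⟨g0, hg0f⟩ := List.exists_mem_of_ne_nil _ hcol
        obtain ⟨g1, hg1, rfl⟩ := List.mem_map.mp hg0f
        have hg1' := List.mem_filter.mp hg1
        have hLM : L + 1 ≤ M := by
          have := pvFoldMax_ge ags 0 g1 hg1'.1
          have hlen : L < g1.length := by simpa using hg1'.2
          omega
        have hM : M = L + 1 := by omega
        have hrem : T - m1 = (pvColAt ags L).length := by
          have := pvTotal_split ags L hDle
          rw [hTdef, hm1sum]
          unfold pvColAt
          simp only [List.length_map]
          omega
        have hct : pvCycleTake (pvColAt ags L) (T - m1) = pvColAt ags L := by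
          rw [hrem, pvCycleTake.eq_def,
            dif_neg (by push_neg; exact ⟨fun h => hcol (List.length_eq_zero_iff.mp h), hcol⟩)]
          rw [List.take_length, Nat.sub_self, pvCycleTake_zero, List.append_nil]
        rw [hxsdef, hct, hM, ← pvCols_succ]
      -- end cases
    rw [pvColsFold ags M]
    simp only
    rw [← hxsM, hkdef]
    exact (pvChunkFold limit hl xs).symm

theorem group_size_distribute_changed : Claim_changed_group_size_distribute := by
  unfold Claim_changed_group_size_distribute
  refine ⟨by decide, by decide, by decide, ?_, ?_, by decide⟩ <;> rfl
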